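-- pv_equiv track=rewrite | github.com/yunusarli/DataStructuresAndAlgorithmsWithPython | recursion/problems.py | element_uniqueness_problem
-- ===== SOURCE A (Python) =====
-- def element_uniqueness_problem(sequence):
--     """
--     Problem: Solve Element uniqueness problem recursivly at most O(n^2) time complexity
--     """
--     if len(sequence) == 1:
--         return True
--     else:
--         elem = sequence[0]
--         draft = sequence[1:]
--         contains = elem in draft
--
--         if contains: return False
--         return element_uniqueness_problem(draft)
-- ===== SOURCE B (Python) =====
-- def element_uniqueness_problem(sequence):
--     """Elements are all unique iff deduplicating does not shrink the sequence."""
--     if len(sequence) == 0: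
--         return True  # vacuously unique; A raises IndexError here (outside Pre_)
--     return len(set(sequence)) == len(sequence)
-- ===== Notes on version B (the rewrite author's own statement) =====
-- stated objective: faster
-- what changed: Replaces the O(n^2) recursion with slicing and linear membership tests by a single set construction comparing len(set(sequence)) with len(sequence).
import Mathlib
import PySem

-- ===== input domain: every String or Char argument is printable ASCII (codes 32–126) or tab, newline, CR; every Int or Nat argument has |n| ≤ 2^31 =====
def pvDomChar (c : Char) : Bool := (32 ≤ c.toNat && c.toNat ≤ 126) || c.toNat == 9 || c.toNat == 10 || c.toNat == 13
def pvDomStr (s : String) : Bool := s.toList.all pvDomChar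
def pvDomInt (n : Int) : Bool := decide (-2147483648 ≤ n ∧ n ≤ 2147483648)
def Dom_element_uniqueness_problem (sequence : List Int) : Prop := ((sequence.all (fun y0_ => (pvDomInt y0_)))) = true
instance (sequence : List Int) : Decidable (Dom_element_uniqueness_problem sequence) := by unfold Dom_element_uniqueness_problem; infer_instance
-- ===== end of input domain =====

-- B replaces A's O(n^2) slicing recursion by one set construction: len(set(sequence)) == len(sequence).

-- ===== PORT A =====
-- A: if len == 1 return True; else elem = sequence[0] (IndexError on []), draft = sequence[1:],
-- return False if elem in draft else recurse on draft.
def element_uniqueness_problem : List Int → Bool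
  | [] => true            -- Python raises IndexError here (sequence[0] on []); excluded by Pre_
  | [_] => true           -- len(sequence) == 1
  | elem :: draft => if draft.contains elem then false else element_uniqueness_problem draft

-- ===== PORT B =====
-- B: empty guard returns True, else len(set(sequence)) == len(sequence)
def element_uniqueness_problem_alt (sequence : List Int) : Bool :=
  if sequence.length = 0 then true
  else decide ((PySem.Set.ofList sequence).length = sequence.length)

-- ===== PRECONDITION & SPEC =====
-- Pre_ excludes exactly the empty list, on which Python A raises IndexError.
def Pre_element_uniqueness_problem (sequence : List Int) : Prop := sequence ≠ []
instance (sequence : List Int) : Decidable (Pre_element_uniqueness_problem sequence) := by unfold Pre_element_uniqueness_problem; infer_instance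
def pvWitness_element_uniqueness_problem : List Int := [1, 2, 3]

def Spec_element_uniqueness_problem (sequence : List Int) (out : Bool) : Prop := out = element_uniqueness_problem_alt sequence
instance (sequence : List Int) (out : Bool) : Decidable (Spec_element_uniqueness_problem sequence out) := by unfold Spec_element_uniqueness_problem; infer_instance

-- ===== CLAIM (what is proved, stated in full; the proofs are below) =====
def Claim_equal_element_uniqueness_problem : Prop := ∀ (sequence : List Int), Dom_element_uniqueness_problem sequence → Pre_element_uniqueness_problem sequence → Spec_element_uniqueness_problem sequence (element_uniqueness_problem sequence)
-- ===== LEMMAS AND PROOFS =====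

-- A computes Nodup on every nonempty list.
theorem portA_eq_nodup : ∀ (l : List Int), l ≠ [] → element_uniqueness_problem l = decide l.Nodup := by
  intro l
  induction l with
  | nil => intro h; exact absurd rfl h
  | cons x xs ih =>
    intro _
    cases xs with
    | nil => simp [element_uniqueness_problem]
    | cons y ys =>
      have ih' := ih (List.cons_ne_nil y ys)
      by_cases hx : (y :: ys).contains x
      · have hm : x ∈ y :: ys := by simpa using hx
        simp [element_uniqueness_problem, hx, hm]
      · have hm : x ∉ y :: ys := by simpa using hx
        simp [element_uniqueness_problem, hx, ih', hm]

-- Upper bound: the fold adds at most one element per item.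
theorem foldl_add_len_le : ∀ (l acc : List Int), (l.foldl PySem.Set.add acc).length ≤ acc.length + l.length := by
  intro l
  induction l with
  | nil => intro acc; simp
  | cons x xs ih =>
    intro acc
    refine le_trans (ih (PySem.Set.add acc x)) ?_
    have : (PySem.Set.add acc x).length ≤ acc.length + 1 := by
      unfold PySem.Set.add; split <;> simp
    simp only [List.length_cons]; omega

theorem foldl_add_len_iff : ∀ (l acc : List Int),
    (l.foldl PySem.Set.add acc).length = acc.length + l.length ↔
      (l.Nodup ∧ ∀ x ∈ l, x ∉ acc) := by
  intro l
  induction l with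
  | nil => intro acc; simp
  | cons x xs ih =>
    intro acc
    by_cases hx : PySem.Set.contains acc x
    · have hmem : x ∈ acc := by simpa [PySem.Set.contains] using hx
      have hadd : PySem.Set.add acc x = acc := by unfold PySem.Set.add; rw [if_pos hx]
      rw [List.foldl_cons, hadd]
      have hub := foldl_add_len_le xs acc
      simp only [List.length_cons, List.nodup_cons]
      constructor
      · intro h; omega
      · rintro ⟨-, hdisj⟩
        exact absurd hmem (hdisj x (by simp))
    · have hmem : x ∉ acc := by simpa [PySem.Set.contains] using hx
      have hadd : PySem.Set.add acc x = acc ++ [x] := by unfold PySem.Set.add; rw [if_neg hx]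
      rw [List.foldl_cons, hadd,
        show acc.length + (x :: xs).length = (acc ++ [x]).length + xs.length from by simp; omega,
        ih (acc ++ [x])]
      simp only [List.nodup_cons, List.mem_append, List.mem_cons, List.not_mem_nil, or_false]
      constructor
      · rintro ⟨hnd, hdisj⟩
        refine ⟨⟨fun hxs => (hdisj x hxs) (Or.inr rfl), hnd⟩, ?_⟩
        rintro y (rfl | hy)
        · exact hmem
        · intro hacc; exact (hdisj y hy) (Or.inl hacc)
      · rintro ⟨⟨hxn, hnd⟩, hdisj⟩
        refine ⟨hnd, ?_⟩
        rintro y hy (hacc | rfl)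
        · exact (hdisj y (Or.inr hy)) hacc
        · exact hxn hy

-- B computes Nodup on every list.
theorem portB_eq_nodup : ∀ (l : List Int), element_uniqueness_problem_alt l = decide l.Nodup := by
  intro l
  unfold element_uniqueness_problem_alt
  by_cases h0 : l.length = 0
  · simp_all [List.length_eq_zero_iff.mp h0]
  · rw [if_neg h0]
    have h2 : (PySem.Set.ofList l).length = l.length ↔ l.Nodup := by
      have := foldl_add_len_iff l []
      unfold PySem.Set.ofList PySem.Set.empty
      simpa using this
    by_cases hnd : l.Nodup <;> simp [h2, hnd]

-- ===== VERDICT (by name: the statement is the Claim_ definition above) =====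
theorem element_uniqueness_problem_spec : Claim_equal_element_uniqueness_problem := by
  intro sequence _ hpre
  unfold Spec_element_uniqueness_problem
  rw [portA_eq_nodup sequence hpre, portB_eq_nodup]
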